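-- pv_equiv track=rewrite | github.com/136avm/ALF-FINAL-GUI | entonacion.py | sust1
-- ===== SOURCE A (Python) =====
-- def sust1(silaba):
--     lista = list(silaba)
--     for i in range(len(silaba)):
--         if lista[i] == 'a':
--             lista[i] = 'A'
--         if lista[i] == 'e':
--             lista[i] = 'E'
--         if lista[i] == 'o':
--             lista[i] = 'O'
--     silaba = ''.join(lista)
--     return silaba
-- ===== SOURCE B (Python) =====
-- def sust1(silaba):
--     # three staged whole-string substitution passes; safe because the
--     # replacements are disjoint (targets are lowercase, outputs uppercase)
--     for old, new in (('a', 'A'), ('e', 'E'), ('o', 'O')):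
--         silaba = silaba.replace(old, new)
--     return silaba
-- ===== Notes on version B (the rewrite author's own statement) =====
-- stated objective: idiomatic
-- what changed: Replaces A's single indexed loop with three conditional in-place writes per position by three staged whole-string substitution passes (str.replace per vowel), folding over the (old,new) pairs instead of over string positions; correct because the three substitutions are disjoint and never cascade.
import Mathlib
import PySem

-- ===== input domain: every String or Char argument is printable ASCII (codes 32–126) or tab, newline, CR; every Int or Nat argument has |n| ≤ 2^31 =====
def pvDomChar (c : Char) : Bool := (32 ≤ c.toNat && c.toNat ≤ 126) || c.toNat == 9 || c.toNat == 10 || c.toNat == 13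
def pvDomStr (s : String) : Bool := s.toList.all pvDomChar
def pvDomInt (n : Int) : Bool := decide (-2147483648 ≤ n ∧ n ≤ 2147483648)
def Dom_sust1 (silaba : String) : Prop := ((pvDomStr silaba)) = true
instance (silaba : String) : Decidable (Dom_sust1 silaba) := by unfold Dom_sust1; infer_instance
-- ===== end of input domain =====

-- B replaces A's single indexed loop with three conditional writes per position
-- by three staged whole-string substitution passes (str.replace per vowel pair).


-- ===== PORT A =====
-- the loop body: lista[i] read and conditionally overwritten, three sequential ifs
def sust1Step (l : List Char) (i : Int) : List Char :=
  let l := if PySem.List.pyGetD l i ' ' == 'a' then PySem.List.pySetD l i 'A' else l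
  let l := if PySem.List.pyGetD l i ' ' == 'e' then PySem.List.pySetD l i 'E' else l
  let l := if PySem.List.pyGetD l i ' ' == 'o' then PySem.List.pySetD l i 'O' else l
  l

def sust1 (silaba : String) : String :=
  let lista := silaba.toList
  let lista := (PySem.List.pyRange 0 (lista.length : Int) 1).foldl sust1Step lista
  String.ofList lista

-- ===== PORT B =====
-- for old, new in (('a','A'),('e','E'),('o','O')): silaba = silaba.replace(old, new)
def sust1_alt (silaba : String) : String :=
  [('a', 'A'), ('e', 'E'), ('o', 'O')].foldl
    (fun s (p : Char × Char) => PySem.Str.replace s (String.ofList [p.1]) (String.ofList [p.2])) silaba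

-- ===== PRECONDITION & SPEC =====
def Spec_sust1 (silaba : String) (out : String) : Prop := out = sust1_alt silaba
instance (silaba : String) (out : String) : Decidable (Spec_sust1 silaba out) := by unfold Spec_sust1; infer_instance

-- ===== CLAIM (what is proved, stated in full; the proofs are below) =====
def Claim_equal_sust1 : Prop := ∀ (silaba : String), Dom_sust1 silaba → Spec_sust1 silaba (sust1 silaba)

-- ===== LEMMAS AND PROOFS =====
-- the per-character effect both programs agree on
def sust1Tr (c : Char) : Char :=
  if c = 'a' then 'A' else if c = 'e' then 'E' else if c = 'o' then 'O' else c

-- single-character substitution pass, as a pointwise map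
def tr1 (o n c : Char) : Char := if c = o then n else c

lemma replace_go_single (o n : Char) : ∀ (fuel : Nat) (l acc : List Char),
    l.length ≤ fuel →
    PySem.Chars.replace.go [o] [n] fuel l acc = acc.reverse ++ l.map (tr1 o n) := by
  intro fuel
  induction fuel with
  | zero => intro l acc h; cases l with
    | nil => simp [PySem.Chars.replace.go]
    | cons c t => simp at h
  | succ fuel ih =>
    intro l acc h
    cases l with
    | nil => simp [PySem.Chars.replace.go]
    | cons c t =>
      simp only [List.length_cons] at h
      by_cases hc : c = o
      · have hpre : [o].isPrefixOf (c :: t) = true := by simp [hc, List.isPrefixOf]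
        rw [PySem.Chars.replace.go, if_pos hpre]
        simp only [List.length_singleton, List.drop_one, List.tail_cons]
        rw [ih t ([n].reverse ++ acc) (by omega)]
        simp [tr1, hc]
      · have hpre : [o].isPrefixOf (c :: t) = false := by
          simp only [List.isPrefixOf, Bool.and_eq_false_iff, beq_eq_false_iff_ne, ne_eq]
          exact Or.inl fun h => hc h.symm
        rw [PySem.Chars.replace.go, if_neg (by simp [hpre])]
        rw [ih t (c :: acc) (by omega)]
        simp [tr1, hc]

lemma replace_single (o n : Char) (cs : List Char) :
    PySem.Chars.replace cs [o] [n] = cs.map (tr1 o n) := by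
  rw [PySem.Chars.replace, if_neg (by simp)]
  simpa using replace_go_single o n cs.length cs [] le_rfl

lemma tr1_compose (c : Char) :
    tr1 'o' 'O' (tr1 'e' 'E' (tr1 'a' 'A' c)) = sust1Tr c := by
  by_cases ha : c = 'a'
  · subst ha; decide
  · by_cases he : c = 'e'
    · subst he; decide
    · by_cases ho : c = 'o'
      · subst ho; decide
      · simp [tr1, sust1Tr, ha, he, ho]

lemma str_replace_single (s : String) (o n : Char) :
    (PySem.Str.replace s (String.ofList [o]) (String.ofList [n])).toList = s.toList.map (tr1 o n) := by
  rw [PySem.Str.toList_replace]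
  simpa using replace_single o n s.toList

lemma sust1_alt_map (silaba : String) :
    sust1_alt silaba = String.ofList (silaba.toList.map sust1Tr) := by
  have h : (sust1_alt silaba).toList = silaba.toList.map sust1Tr := by
    simp only [sust1_alt, List.foldl_cons, List.foldl_nil]
    rw [str_replace_single, str_replace_single, str_replace_single, List.map_map, List.map_map]
    exact List.map_congr_left fun c _ => tr1_compose c
  calc sust1_alt silaba = String.ofList (sust1_alt silaba).toList := String.ofList_toList.symm
    _ = _ := by rw [h]

-- A's loop: processing position i rewrites exactly the i-th character by sust1Tr
lemma sust1Step_at (done rest : List Char) (c : Char) :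
    sust1Step (done ++ c :: rest) (done.length : Int) = done ++ sust1Tr c :: rest := by
  have hset : ∀ (v w : Char) (r : List Char),
      (done ++ v :: r).set done.length w = done ++ w :: r := by
    intro v w r; rw [List.set_append_right _ _ (le_refl _)]; simp
  simp only [sust1Step, PySem.List.pyGetD_natCast, PySem.List.pySetD_natCast]
  by_cases ha : c = 'a'
  · subst ha; simp [hset, sust1Tr]
  · by_cases he : c = 'e'
    · subst he; simp [hset, sust1Tr]
    · by_cases ho : c = 'o'
      · subst ho; simp [hset, sust1Tr]
      · simp [ha, he, ho, sust1Tr]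

lemma sust1_loop (rest : List Char) : ∀ (done : List Char),
    (PySem.List.pyRange (done.length : Int) ((done.length + rest.length : Nat) : Int) 1).foldl
      sust1Step (done ++ rest) = done ++ rest.map sust1Tr := by
  induction rest with
  | nil => intro done; simp [PySem.List.pyRange]
  | cons c rest ih =>
    intro done
    have hlt : (done.length : Int) < ((done.length + (c :: rest).length : Nat) : Int) := by
      simp only [List.length_cons]; push_cast; omega
    rw [PySem.List.pyRange_one_cons hlt, List.foldl_cons, sust1Step_at]
    have harr : done ++ sust1Tr c :: rest = (done ++ [sust1Tr c]) ++ rest := by simp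
    have hlen : (done.length : Int) + 1 = ((done ++ [sust1Tr c]).length : Int) := by simp
    have hlen2 : ((done.length + (c :: rest).length : Nat) : Int)
        = (((done ++ [sust1Tr c]).length + rest.length : Nat) : Int) := by simp; omega
    rw [harr, hlen, hlen2, ih (done ++ [sust1Tr c])]
    simp

-- ===== VERDICT (by name: the statement is the Claim_ definition above) =====
theorem sust1_spec : Claim_equal_sust1 := by
  intro silaba _
  show sust1 silaba = sust1_alt silaba
  rw [sust1_alt_map]
  dsimp only [sust1]
  have := sust1_loop silaba.toList []
  simp only [List.nil_append, List.length_nil, Nat.zero_add, Nat.cast_zero] at this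
  rw [this]
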